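-- pv_equiv track=rewrite | github.com/kirilaa/convex-multi-commodity-flow | funciones.py | seleccionar_path_minimo_coste
-- ===== SOURCE A (Python) =====
-- def seleccionar_path_minimo_coste(commodities, costes_path_anterior):
--     shortest_paths = {}
--     for commodity in commodities:
--         paths_costes = {
--             path_id: coste
--             for (commodity_iter, path_id), coste in costes_path_anterior.items()
--             if commodity_iter == commodity
--         }
--
--         if paths_costes:
--             path_minimo_id = min(paths_costes, key=paths_costes.get)
--             shortest_paths[commodity] = path_minimo_id
--
--     return shortest_paths
-- ===== SOURCE B (Python) =====
-- def seleccionar_path_minimo_coste(commodities, costes_path_anterior):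
--     # One pass over the cost dict, tracking the per-commodity minimum (first wins on ties),
--     # then assemble the answer in commodity order.
--     best = {}
--     for (c, p), coste in costes_path_anterior.items():
--         cur = best.get(c)
--         if cur is None or coste < cur[0]:
--             best[c] = (coste, p)
--     shortest_paths = {}
--     for c in commodities:
--         if c in best:
--             shortest_paths[c] = best[c][1]
--     return shortest_paths
-- ===== Notes on version B (the rewrite author's own statement) =====
-- stated objective: faster
-- what changed: Instead of rescanning the whole cost dict once per commodity and running min over a rebuilt per-commodity dict, B makes a single pass over the cost dict keeping the running (min cost, path) per commodity, then assembles the result in commodity order.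
import Mathlib
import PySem

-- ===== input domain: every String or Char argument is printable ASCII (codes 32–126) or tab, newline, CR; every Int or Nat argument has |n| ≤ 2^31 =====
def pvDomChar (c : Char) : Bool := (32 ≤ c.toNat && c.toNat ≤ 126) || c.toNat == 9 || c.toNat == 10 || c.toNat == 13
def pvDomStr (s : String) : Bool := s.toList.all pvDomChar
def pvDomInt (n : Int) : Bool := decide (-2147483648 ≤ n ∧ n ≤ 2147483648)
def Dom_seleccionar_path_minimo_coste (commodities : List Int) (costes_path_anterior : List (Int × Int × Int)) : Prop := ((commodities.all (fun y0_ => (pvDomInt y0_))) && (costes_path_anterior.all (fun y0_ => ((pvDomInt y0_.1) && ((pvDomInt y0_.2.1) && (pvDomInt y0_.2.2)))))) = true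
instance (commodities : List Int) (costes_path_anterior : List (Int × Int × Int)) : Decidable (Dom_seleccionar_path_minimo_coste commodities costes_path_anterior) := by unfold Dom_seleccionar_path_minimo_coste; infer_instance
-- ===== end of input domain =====

-- B replaces A's per-commodity rescan of the whole cost dict by a single grouping pass
-- keeping the running per-commodity minimum, then assembles the answer in commodity order;
-- objective: faster.

-- ===== PORT A =====
def seleccionar_path_minimo_coste (commodities : List Int) (costes_path_anterior : List (Int × Int × Int)) : List (Int × Int) :=
  (commodities.foldl
    (fun (sp : PySem.Dict Int Int) c =>
      let pc : PySem.Dict Int Int :=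
        costes_path_anterior.foldl
          (fun d e => if e.1 == c then d.insert e.2.1 e.2.2 else d) PySem.Dict.empty
      -- min(paths_costes, key=paths_costes.get): every key queried is in pc, so getD is exact
      match PySem.List.min? pc.keys (fun p => pc.getD p 0) with
      | some p => sp.insert c p
      | none => sp)
    PySem.Dict.empty).items

-- ===== PORT B =====
def seleccionar_path_minimo_coste_alt (commodities : List Int) (costes_path_anterior : List (Int × Int × Int)) : List (Int × Int) :=
  let best : PySem.Dict Int (Int × Int) :=
    costes_path_anterior.foldl
      (fun b e =>
        match b.get? e.1 with
        | none => b.insert e.1 (e.2.2, e.2.1)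
        | some cur => if e.2.2 < cur.1 then b.insert e.1 (e.2.2, e.2.1) else b)
      PySem.Dict.empty
  (commodities.foldl
    (fun (out : PySem.Dict Int Int) c =>
      match best.get? c with
      | some cur => out.insert c cur.2
      | none => out)
    PySem.Dict.empty).items

-- ===== PRECONDITION & SPEC =====
-- Pre_ excludes association lists with a duplicate (commodity, path_id) key: A's argument is a
-- Python dict, whose key set is duplicate-free by construction, so no such input reaches A.
def Pre_seleccionar_path_minimo_coste (commodities : List Int) (costes_path_anterior : List (Int × Int × Int)) : Prop :=
  (costes_path_anterior.map (fun e => (e.1, e.2.1))).Nodup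
instance (commodities : List Int) (costes_path_anterior : List (Int × Int × Int)) : Decidable (Pre_seleccionar_path_minimo_coste commodities costes_path_anterior) := by unfold Pre_seleccionar_path_minimo_coste; infer_instance
def pvWitness_seleccionar_path_minimo_coste : List Int × (List (Int × Int × Int)) :=
  ([1, 2, 3], [(1, 0, 5), (1, 1, 3), (2, 0, 7), (2, 1, 7)])
def Spec_seleccionar_path_minimo_coste (commodities : List Int) (costes_path_anterior : List (Int × Int × Int)) (out : List (Int × Int)) : Prop := out = seleccionar_path_minimo_coste_alt commodities costes_path_anterior
instance (commodities : List Int) (costes_path_anterior : List (Int × Int × Int)) (out : List (Int × Int)) : Decidable (Spec_seleccionar_path_minimo_coste commodities costes_path_anterior out) := by unfold Spec_seleccionar_path_minimo_coste; infer_instance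

-- ===== CLAIM (what is proved, stated in full; the proofs are below) =====
def Claim_equal_seleccionar_path_minimo_coste : Prop := ∀ (commodities : List Int) (costes_path_anterior : List (Int × Int × Int)), Dom_seleccionar_path_minimo_coste commodities costes_path_anterior → Pre_seleccionar_path_minimo_coste commodities costes_path_anterior → Spec_seleccionar_path_minimo_coste commodities costes_path_anterior (seleccionar_path_minimo_coste commodities costes_path_anterior)

-- ===== LEMMAS AND PROOFS =====

lemma pv_min_fold_map {α β : Type} (f : α → β) (key : β → Int) (g : α → Int)
    (ys : List α) (acc : Option α)
    (h : ∀ y ∈ ys, key (f y) = g y) (hacc : ∀ a ∈ acc, key (f a) = g a) :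
    ys.foldl (fun o y => match o with
      | none => some (f y)
      | some m => if key (f y) < key m then some (f y) else some m) (acc.map f)
  = (ys.foldl (fun o y => match o with
      | none => some y
      | some m => if g y < g m then some y else some m) acc).map f := by
  induction ys generalizing acc with
  | nil => rfl
  | cons y t ih =>
    have hy := h y (by simp)
    simp only [List.foldl_cons]
    cases acc with
    | none =>
      exact ih (some y) (fun z hz => h z (List.mem_cons_of_mem _ hz))
        (by intro a ha; simp only [Option.mem_def, Option.some.injEq] at ha; subst ha; exact hy)
    | some a =>
      have ha := hacc a (by simp)
      show t.foldl _ (if key (f y) < key (f a) then some (f y) else some (f a))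
         = (t.foldl _ (if g y < g a then some y else some a)).map f
      rw [hy, ha]
      by_cases hlt : g y < g a
      · rw [if_pos hlt, if_pos hlt]
        exact ih (some y) (fun z hz => h z (List.mem_cons_of_mem _ hz))
          (by intro b hb; simp only [Option.mem_def, Option.some.injEq] at hb; subst hb; exact hy)
      · rw [if_neg hlt, if_neg hlt]
        exact ih (some a) (fun z hz => h z (List.mem_cons_of_mem _ hz))
          (by intro b hb; simp only [Option.mem_def, Option.some.injEq] at hb; subst hb; exact ha)


-- two first-minimum folds that agree pointwise (cases on the accumulator) agree
lemma pv_foldl_step_ext {α γ : Type} {F G : Option γ → α → Option γ} (ys : List α)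
    (acc acc' : Option γ) (hacc : acc = acc')
    (h : ∀ o y, F o y = G o y) : ys.foldl F acc = ys.foldl G acc' := by
  subst hacc
  apply List.foldl_ext
  intro a b _
  exact h a b

lemma pv_min?_map {α β : Type} (f : α → β) (key : β → Int) (g : α → Int) (ys : List α)
    (h : ∀ y ∈ ys, key (f y) = g y) :
    PySem.List.min? (ys.map f) key = (PySem.List.min? ys g).map f := by
  unfold PySem.List.min?
  rw [List.foldl_map]
  have hm := pv_min_fold_map f key g ys none h (by intro a ha; simp at ha)
  refine Eq.trans (pv_foldl_step_ext ys none (Option.map f none) rfl ?_) (hm.trans (congrArg _ (pv_foldl_step_ext ys none none rfl ?_)))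
  · intro o y; cases o <;> rfl
  · intro o y; cases o <;> rfl

def pvFl (costes : List (Int × Int × Int)) (c : Int) : List (Int × Int) :=
  (costes.filter (fun e => e.1 == c)).map (fun e => (e.2.1, e.2.2))

lemma pv_nodup_filtered (l : List (Int × Int × Int)) (c : Int)
    (h : (l.map (fun e => (e.1, e.2.1))).Nodup) :
    ((l.filter (fun e => e.1 == c)).map (fun e => e.2.1)).Nodup := by
  induction l with
  | nil => simp
  | cons e t ih =>
    simp only [List.map_cons, List.nodup_cons] at h
    by_cases hc : (e.1 == c) = true
    · rw [List.filter_cons_of_pos (p := fun e : Int × Int × Int => e.1 == c) hc]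
      simp only [List.map_cons, List.nodup_cons]
      refine ⟨?_, ih h.2⟩
      intro hm
      simp only [List.mem_map, List.mem_filter] at hm
      obtain ⟨e', ⟨he't, he'c⟩, he'p⟩ := hm
      apply h.1
      have h1 : (e'.1, e'.2.1) = (e.1, e.2.1) := by
        rw [eq_of_beq he'c, eq_of_beq hc, he'p]
      rw [← h1]
      exact List.mem_map_of_mem he't
    · rw [List.filter_cons_of_neg (p := fun e : Int × Int × Int => e.1 == c) hc]
      exact ih h.2

lemma pv_pc_items (costes : List (Int × Int × Int)) (c : Int)
    (h : (costes.map (fun e => (e.1, e.2.1))).Nodup) :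
    (costes.foldl (fun d e => if e.1 == c then d.insert e.2.1 e.2.2 else d)
        (PySem.Dict.empty : PySem.Dict Int Int)).items = pvFl costes c := by
  rw [← List.foldl_filter]
  refine (PySem.Dict.items_foldl_insert_fresh (costes.filter (fun e => e.1 == c))
      (fun e => e.2.1) (fun e => e.2.2) PySem.Dict.empty
      (by intro a _; simp [PySem.Dict.contains_empty]) (pv_nodup_filtered costes c h)).trans ?_
  simp [pvFl, PySem.Dict.empty]
lemma pv_best_get (l : List (Int × Int × Int)) (c : Int) (b : PySem.Dict Int (Int × Int)) :
    (l.foldl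
      (fun b e =>
        match b.get? e.1 with
        | none => b.insert e.1 (e.2.2, e.2.1)
        | some cur => if e.2.2 < cur.1 then b.insert e.1 (e.2.2, e.2.1) else b) b).get? c
  = (pvFl l c).foldl (fun o pr => match o with
      | none => some (pr.2, pr.1)
      | some q => if pr.2 < q.1 then some (pr.2, pr.1) else some q) (b.get? c) := by
  induction l generalizing b with
  | nil => rfl
  | cons e t ih =>
    rw [List.foldl_cons, ih]
    by_cases hc : (e.1 == c) = true
    · have hec : e.1 = c := eq_of_beq hc
      subst hec
      have hfl : pvFl (e :: t) e.1 = (e.2.1, e.2.2) :: pvFl t e.1 := by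
        unfold pvFl
        rw [List.filter_cons_of_pos (p := fun x : Int × Int × Int => x.1 == e.1) (by simp), List.map_cons]
      rw [hfl, List.foldl_cons]
      congr 1
      cases hb : b.get? e.1 with
      | none => simp only [PySem.Dict.get?_insert_self]
      | some cur =>
        by_cases hlt : e.2.2 < cur.1
        · simp only [hlt, if_pos, PySem.Dict.get?_insert_self]
        · simp [hb, hlt]
    · have hec : ¬ e.1 = c := fun h => hc (by simp [h])
      have hfl : pvFl (e :: t) c = pvFl t c := by
        unfold pvFl
        rw [List.filter_cons_of_neg (p := fun x : Int × Int × Int => x.1 == c) (by simpa using hec)]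
      rw [hfl]
      congr 1
      cases hb : b.get? e.1 with
      | none => rw [PySem.Dict.get?_insert_of_ne _ _ (fun h => hec h.symm)]
      | some cur =>
        by_cases hlt : e.2.2 < cur.1
        · simp only [hlt, if_pos]; rw [PySem.Dict.get?_insert_of_ne _ _ (fun h => hec h.symm)]
        · simp [hlt]

lemma pv_selB (costes : List (Int × Int × Int)) (c : Int) :
    (costes.foldl
      (fun b e =>
        match b.get? e.1 with
        | none => b.insert e.1 (e.2.2, e.2.1)
        | some cur => if e.2.2 < cur.1 then b.insert e.1 (e.2.2, e.2.1) else b)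
      (PySem.Dict.empty : PySem.Dict Int (Int × Int))).get? c
  = (PySem.List.min? (pvFl costes c) (fun pr => pr.2)).map (fun pr => (pr.2, pr.1)) := by
  rw [pv_best_get costes c PySem.Dict.empty, PySem.Dict.get?_empty]
  unfold PySem.List.min?
  have hm := pv_min_fold_map (fun pr : Int × Int => (pr.2, pr.1)) (fun q => q.1) (fun pr => pr.2) (pvFl costes c) none (fun y _ => rfl) (by intro a ha; simp at ha)
  refine Eq.trans (pv_foldl_step_ext (pvFl costes c) none (Option.map (fun pr : Int × Int => (pr.2, pr.1)) none) rfl ?_) (hm.trans (congrArg _ (pv_foldl_step_ext (pvFl costes c) none none rfl ?_)))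
  · intro o y; cases o <;> rfl
  · intro o y; cases o <;> rfl

-- A's per-commodity selection equals the first minimal-cost pair of the filtered list
lemma pv_selA (costes : List (Int × Int × Int)) (c : Int)
    (h : (costes.map (fun e => (e.1, e.2.1))).Nodup) :
    PySem.List.min?
      (costes.foldl (fun d e => if e.1 == c then d.insert e.2.1 e.2.2 else d)
        (PySem.Dict.empty : PySem.Dict Int Int)).keys
      (fun p => (costes.foldl (fun d e => if e.1 == c then d.insert e.2.1 e.2.2 else d)
        (PySem.Dict.empty : PySem.Dict Int Int)).getD p 0)
  = (PySem.List.min? (pvFl costes c) (fun pr => pr.2)).map (fun pr => pr.1) := by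
  set pc : PySem.Dict Int Int :=
    costes.foldl (fun d e => if e.1 == c then d.insert e.2.1 e.2.2 else d) PySem.Dict.empty
    with hpc
  have hitems : pc.items = pvFl costes c := pv_pc_items costes c h
  have hkeysnd : pc.keys.Nodup := by
    unfold PySem.Dict.keys
    rw [hitems]
    unfold pvFl
    rw [List.map_map]
    exact pv_nodup_filtered costes c h
  have hkeys : pc.keys = (pvFl costes c).map (fun pr => pr.1) := by
    unfold PySem.Dict.keys; rw [hitems]
  rw [hkeys]
  exact pv_min?_map (fun pr : Int × Int => pr.1) (fun p => pc.getD p 0) (fun pr => pr.2) _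
    (fun pr hpr => PySem.Dict.getD_of_mem_items pc (by rw [hitems]; simpa using hpr) hkeysnd 0)

-- ===== VERDICT (by name: the statement is the Claim_ definition above) =====
theorem seleccionar_path_minimo_coste_spec : Claim_equal_seleccionar_path_minimo_coste := by
  intro commodities costes _hdom hpre
  unfold Spec_seleccionar_path_minimo_coste
  unfold seleccionar_path_minimo_coste seleccionar_path_minimo_coste_alt
  have hfold :
      commodities.foldl
        (fun (sp : PySem.Dict Int Int) c =>
          let pc : PySem.Dict Int Int :=
            costes.foldl (fun d e => if e.1 == c then d.insert e.2.1 e.2.2 else d) PySem.Dict.empty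
          match PySem.List.min? pc.keys (fun p => pc.getD p 0) with
          | some p => sp.insert c p
          | none => sp)
        PySem.Dict.empty
    = commodities.foldl
        (fun (out : PySem.Dict Int Int) c =>
          match (costes.foldl
              (fun b e =>
                match b.get? e.1 with
                | none => b.insert e.1 (e.2.2, e.2.1)
                | some cur => if e.2.2 < cur.1 then b.insert e.1 (e.2.2, e.2.1) else b)
              (PySem.Dict.empty : PySem.Dict Int (Int × Int))).get? c with
          | some cur => out.insert c cur.2
          | none => out)
        PySem.Dict.empty := by
    apply List.foldl_ext
    intro sp c _hc
    show (match PySem.List.min?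
        (costes.foldl (fun d e => if e.1 == c then d.insert e.2.1 e.2.2 else d)
          (PySem.Dict.empty : PySem.Dict Int Int)).keys
        (fun p => (costes.foldl (fun d e => if e.1 == c then d.insert e.2.1 e.2.2 else d)
          (PySem.Dict.empty : PySem.Dict Int Int)).getD p 0) with
      | some p => sp.insert c p
      | none => sp) = _
    rw [pv_selA costes c hpre, pv_selB costes c]
    cases PySem.List.min? (pvFl costes c) (fun pr => pr.2) with
    | none => rfl
    | some pr => rfl
  rw [hfold]
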